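-- pv_equiv track=rewrite | github.com/aswindle/PiMusic | googleLevel2Part2.py | answer
-- ===== SOURCE A (Python) =====
-- def answer(x, y):
--     # Start of the row at height y
--     start = 1 + (y*(y - 1) // 2)
--     # Take x - 1 steps over
--     steps = x - 1
--     # Increased by 1 each time, starting at y + 1
--     change = y + 1
--     for i in range(steps):
--         start += change
--         change += 1
--     return str(start)
-- ===== SOURCE B (Python) =====
-- def answer(x, y):
--     # Closed form: start of row plus arithmetic series sum of the step increments.
--     steps = max(x - 1, 0)
--     return str(1 + y*(y - 1)//2 + steps*(y + 1) + steps*(steps - 1)//2)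
-- ===== Notes on version B (the rewrite author's own statement) =====
-- stated objective: faster
-- what changed: Replaces the O(x) accumulation loop by the arithmetic-series closed form steps*(y+1) + steps*(steps-1)//2.
import Mathlib
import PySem

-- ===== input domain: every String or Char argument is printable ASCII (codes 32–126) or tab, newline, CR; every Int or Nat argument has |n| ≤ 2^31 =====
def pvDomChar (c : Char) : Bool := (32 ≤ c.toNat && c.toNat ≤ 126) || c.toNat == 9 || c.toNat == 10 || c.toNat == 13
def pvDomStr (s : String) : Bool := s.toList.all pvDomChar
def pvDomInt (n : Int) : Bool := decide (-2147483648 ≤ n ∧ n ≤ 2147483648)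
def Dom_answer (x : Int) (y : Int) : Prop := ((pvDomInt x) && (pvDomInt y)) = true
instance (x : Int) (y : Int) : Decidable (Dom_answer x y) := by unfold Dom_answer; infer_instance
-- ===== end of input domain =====

-- B replaces A's O(x) accumulation loop by the O(1) arithmetic-series closed form (faster, asymptotic).


-- ===== PORT A =====
def answer (x : Int) (y : Int) : String :=
  let start := 1 + PySem.Int.floordiv (y * (y - 1)) 2
  let steps := x - 1
  let change := y + 1
  let p := (PySem.List.pyRange 0 steps 1).foldl
    (fun (st : Int × Int) _ => (st.1 + st.2, st.2 + 1)) (start, change)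
  PySem.Int.toStr p.1

-- ===== PORT B =====
def answer_alt (x : Int) (y : Int) : String :=
  let steps := max (x - 1) 0
  PySem.Int.toStr (1 + PySem.Int.floordiv (y * (y - 1)) 2 + steps * (y + 1) +
    PySem.Int.floordiv (steps * (steps - 1)) 2)

-- ===== PRECONDITION & SPEC =====
def Spec_answer (x : Int) (y : Int) (out : String) : Prop := out = answer_alt x y
instance (x : Int) (y : Int) (out : String) : Decidable (Spec_answer x y out) := by unfold Spec_answer; infer_instance

-- ===== CLAIM (what is proved, stated in full; the proofs are below) =====
def Claim_equal_answer : Prop := ∀ (x : Int) (y : Int), Dom_answer x y → Spec_answer x y (answer x y)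

-- ===== LEMMAS AND PROOFS =====

-- A's loop over range(n), started at (s, c), ends at (s + n*c + C(n,2), c + n).
theorem pvFoldRange (n : Nat) (s c : Int) :
    ((PySem.List.pyRange 0 (n : Int) 1).foldl
      (fun (st : Int × Int) _ => (st.1 + st.2, st.2 + 1)) (s, c))
    = (s + n * c + (n.choose 2 : Int), c + n) := by
  induction n generalizing s c with
  | zero => simp [PySem.List.pyRange_one_eq_nil]
  | succ m ih =>
      have h : ((m + 1 : Nat) : Int) = (m : Int) + 1 := by push_cast; ring
      rw [h, PySem.List.pyRange_one_succ_right (by positivity), List.foldl_append, ih]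
      have hc : (m + 1).choose 2 = m.choose 2 + m := by
        simp [Nat.choose_succ_succ]; omega
      simp only [List.foldl_cons, List.foldl_nil, hc, Prod.mk.injEq]
      refine ⟨by push_cast; ring, by push_cast; ring⟩

theorem pvFloordivTwo (k : Int) : PySem.Int.floordiv (2 * k) 2 = k := by
  simp [PySem.Int.floordiv]

theorem pvChooseTwo (n : Nat) : (n : Int) * ((n : Int) - 1) = 2 * (n.choose 2 : Int) := by
  induction n with
  | zero => simp
  | succ m ih =>
      have hc : (m + 1).choose 2 = m.choose 2 + m := by
        simp [Nat.choose_succ_succ]; omega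
      rw [hc]
      push_cast
      push_cast at ih
      ring_nf
      ring_nf at ih
      linarith

-- ===== VERDICT (by name: the statement is the Claim_ definition above) =====
theorem answer_spec : Claim_equal_answer := by
  intro x y _
  simp only [Spec_answer, answer, answer_alt]
  by_cases hx : x - 1 ≤ 0
  · have hm : max (x - 1) 0 = 0 := by omega
    rw [PySem.List.pyRange_one_eq_nil hx, hm]
    rw [show (0 : Int) * (0 - 1) = 2 * 0 by ring, pvFloordivTwo]
    simp
  · obtain ⟨n, hn⟩ : ∃ n : Nat, x - 1 = (n : Int) := ⟨(x - 1).toNat, by omega⟩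
    have hm : max (x - 1) 0 = x - 1 := by omega
    rw [hm, hn, pvFoldRange, pvChooseTwo, pvFloordivTwo]
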